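-- pv_equiv track=rewrite | github.com/epfl-si/wp-ops | ansible/roles/wordpress-instance/filter_plugins/wordpress_languages.py | languages_in_order
-- ===== SOURCE A (Python) =====
-- def languages_in_order(languages):
--     """
--     :return: 'en' first, 'fr' second
--     """
--     def partition(pred, iterable):
--         """
--         https://stackoverflow.com/a/4578605/435004
--         """
--         trues = []
--         falses = []
--         for item in iterable:
--             if pred(item):
--                 trues.append(item)
--             else:
--                 falses.append(item)
--         return trues, falses
--
--     english, other = partition(lambda lang: lang == 'en', languages)
--     french, other = partition(lambda lang: lang == 'fr', other)
--     return english + french + other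
-- ===== SOURCE B (Python) =====
-- def languages_in_order(languages):
--     """
--     :return: 'en' first, 'fr' second
--     """
--     return sorted(languages, key=lambda lang: 0 if lang == 'en' else 1 if lang == 'fr' else 2)
-- ===== Notes on version B (the rewrite author's own statement) =====
-- stated objective: idiomatic
-- what changed: Replaced the two manual partition passes and list concatenation with a single stable sort keyed by a 0/1/2 priority.
import Mathlib
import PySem

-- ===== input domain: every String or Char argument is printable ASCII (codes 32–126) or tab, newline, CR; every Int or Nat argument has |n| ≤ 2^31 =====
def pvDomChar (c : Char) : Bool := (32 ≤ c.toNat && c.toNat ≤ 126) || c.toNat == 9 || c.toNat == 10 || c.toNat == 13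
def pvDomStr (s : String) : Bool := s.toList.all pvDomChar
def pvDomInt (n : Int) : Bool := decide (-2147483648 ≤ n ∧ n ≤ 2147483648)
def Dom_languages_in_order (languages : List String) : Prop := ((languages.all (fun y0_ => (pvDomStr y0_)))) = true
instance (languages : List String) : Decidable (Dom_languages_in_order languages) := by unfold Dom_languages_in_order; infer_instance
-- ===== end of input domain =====

-- B replaces A's two partition passes with one stable sort by a 0/1/2 priority key (idiomatic; same return value).


-- ===== PORT A =====
-- inner helper 'partition': one loop appending each item to trues or falses
def pvPartition (pred : String → Bool) (iterable : List String) : List String × List String :=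
  iterable.foldl (fun acc item =>
    if pred item then (acc.1 ++ [item], acc.2) else (acc.1, acc.2 ++ [item])) ([], [])

def languages_in_order (languages : List String) : List String :=
  let p1 := pvPartition (fun lang => lang == "en") languages
  let english := p1.1
  let other := p1.2
  let p2 := pvPartition (fun lang => lang == "fr") other
  let french := p2.1
  let other2 := p2.2
  english ++ french ++ other2

-- ===== PORT B =====
def pvKey (lang : String) : Int := if lang == "en" then 0 else if lang == "fr" then 1 else 2

def languages_in_order_alt (languages : List String) : List String :=
  PySem.List.sorted languages pvKey false

-- ===== PRECONDITION & SPEC =====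
def Spec_languages_in_order (languages : List String) (out : List String) : Prop := out = languages_in_order_alt languages
instance (languages : List String) (out : List String) : Decidable (Spec_languages_in_order languages out) := by unfold Spec_languages_in_order; infer_instance

-- ===== CLAIM (what is proved, stated in full; the proofs are below) =====
def Claim_equal_languages_in_order : Prop := ∀ (languages : List String), Dom_languages_in_order languages → Spec_languages_in_order languages (languages_in_order languages)

-- ===== LEMMAS AND PROOFS =====

theorem pvPartition_eq_filter (pred : String → Bool) (xs : List String) :
    pvPartition pred xs = (xs.filter pred, xs.filter (fun x => !(pred x))) := by
  have h : ∀ (xs : List String) (t f : List String),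
      xs.foldl (fun acc item =>
        if pred item then (acc.1 ++ [item], acc.2) else (acc.1, acc.2 ++ [item])) (t, f)
      = (t ++ xs.filter pred, f ++ xs.filter (fun x => !(pred x))) := by
    intro xs
    induction xs with
    | nil => intro t f; simp
    | cons x xs ih =>
      intro t f
      by_cases hx : pred x = true <;> simp [List.foldl, hx, ih, List.filter_cons]
  simpa using h xs [] []

theorem insertBy_append_left (before : String → String → Bool) (x : String)
    (l r : List String) (hl : ∀ y ∈ l, before x y = false) :
    PySem.List.insertBy before x (l ++ r) = l ++ PySem.List.insertBy before x r := by
  induction l with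
  | nil => simp
  | cons y l ih =>
    have hy : before x y = false := hl y (by simp)
    simp only [List.cons_append, PySem.List.insertBy, hy]
    simp [ih (fun z hz => hl z (by simp [hz]))]

theorem insertBy_all_before (before : String → String → Bool) (x : String)
    (l : List String) (hl : ∀ y ∈ l, before x y = true) :
    PySem.List.insertBy before x l = x :: l := by
  cases l with
  | nil => simp [PySem.List.insertBy]
  | cons y l => simp [PySem.List.insertBy, hl y (by simp)]

-- loop invariant for the insertion sort with the 0/1/2 key
theorem sorted_loop_three (xs : List String) :
    ∀ (E F O : List String),
      (∀ y ∈ E, pvKey y = 0) → (∀ y ∈ F, pvKey y = 1) → (∀ y ∈ O, pvKey y = 2) →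
      xs.foldl (fun acc x => PySem.List.insertBy (fun a b => decide (pvKey a < pvKey b)) x acc)
        (E ++ F ++ O)
      = (E ++ xs.filter (fun l => l == "en")) ++ (F ++ xs.filter (fun l => l == "fr"))
        ++ (O ++ xs.filter (fun l => !(l == "en") && !(l == "fr"))) := by
  induction xs with
  | nil => intro E F O _ _ _; simp
  | cons x xs ih =>
    intro E F O hE hF hO
    by_cases hen : x == "en"
    · have hk : pvKey x = 0 := by simp [pvKey, hen]
      have step : PySem.List.insertBy (fun a b => decide (pvKey a < pvKey b)) x (E ++ F ++ O)
          = (E ++ [x]) ++ F ++ O := by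
        rw [List.append_assoc, insertBy_append_left _ _ E (F ++ O)
          (fun y hy => by simp [hE y hy, hk]),
          insertBy_all_before _ _ (F ++ O)
          (fun y hy => by
            rcases List.mem_append.mp hy with h | h
            · simp [hF y h, hk]
            · simp [hO y h, hk])]
        simp
      have hx : x = "en" := by simpa using hen
      have hfr : ¬(x == "fr") := by simp [hx]
      have hE' : ∀ y ∈ E ++ [x], pvKey y = 0 := by
        intro y hy
        rcases List.mem_append.mp hy with h | h
        · exact hE y h
        · simp at h; simpa [h] using hk
      simp only [List.foldl, step]
      rw [ih (E ++ [x]) F O hE' hF hO]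
      simp [List.filter_cons, hen, hfr]
    · by_cases hfr : x == "fr"
      · have hk : pvKey x = 1 := by simp [pvKey, hen, hfr]
        have step : PySem.List.insertBy (fun a b => decide (pvKey a < pvKey b)) x (E ++ F ++ O)
            = E ++ (F ++ [x]) ++ O := by
          rw [List.append_assoc, insertBy_append_left _ _ E (F ++ O)
            (fun y hy => by simp [hE y hy, hk]),
            insertBy_append_left _ _ F O (fun y hy => by simp [hF y hy, hk]),
            insertBy_all_before _ _ O (fun y hy => by simp [hO y hy, hk])]
          simp
        have hF' : ∀ y ∈ F ++ [x], pvKey y = 1 := by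
          intro y hy
          rcases List.mem_append.mp hy with h | h
          · exact hF y h
          · simp at h; simpa [h] using hk
        simp only [List.foldl, step]
        rw [ih E (F ++ [x]) O hE hF' hO]
        simp [List.filter_cons, hen, hfr]
      · have hk : pvKey x = 2 := by simp [pvKey, hen, hfr]
        have step : PySem.List.insertBy (fun a b => decide (pvKey a < pvKey b)) x (E ++ F ++ O)
            = E ++ F ++ (O ++ [x]) := by
          rw [List.append_assoc, insertBy_append_left _ _ E (F ++ O)
            (fun y hy => by simp [hE y hy, hk]),
            insertBy_append_left _ _ F O (fun y hy => by simp [hF y hy, hk]),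
            PySem.List.insertBy_of_forall_not_before _ _ O (fun y hy => by simp [hO y hy, hk])]
          simp
        have hO' : ∀ y ∈ O ++ [x], pvKey y = 2 := by
          intro y hy
          rcases List.mem_append.mp hy with h | h
          · exact hO y h
          · simp at h; simpa [h] using hk
        simp only [List.foldl, step]
        rw [ih E F (O ++ [x]) hE hF hO']
        simp [List.filter_cons, hen, hfr]

theorem alt_eq_filters (xs : List String) :
    languages_in_order_alt xs
      = xs.filter (fun l => l == "en") ++ xs.filter (fun l => l == "fr")
        ++ xs.filter (fun l => !(l == "en") && !(l == "fr")) := by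
  unfold languages_in_order_alt
  rw [PySem.List.sorted_eq_foldl_insertBy]
  simpa using sorted_loop_three xs [] [] [] (by simp) (by simp) (by simp)

-- ===== VERDICT (by name: the statement is the Claim_ definition above) =====
theorem languages_in_order_spec : Claim_equal_languages_in_order := by
  intro languages _
  show languages_in_order languages = languages_in_order_alt languages
  rw [alt_eq_filters]
  unfold languages_in_order
  simp only [pvPartition_eq_filter, List.filter_filter]
  have h1 : List.filter (fun a => a == "fr" && !a == "en") languages
      = List.filter (fun l => l == "fr") languages := by
    apply List.filter_congr; intro x _
    by_cases h : x = "fr" <;> simp [h]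
  have h2 : List.filter (fun a => !a == "fr" && !a == "en") languages
      = List.filter (fun l => !(l == "en") && !(l == "fr")) languages := by
    apply List.filter_congr; intro x _
    simp [Bool.and_comm]
  rw [h1, h2]
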